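-- pv_equiv track=rewrite | github.com/Arsen1302/Code-copy-detector | TestData/solutions/problem_1574_5.py | solution_1574_5
-- ===== SOURCE A (Python) =====
-- from typing import List
--
-- def solution_1574_5(stockPrices: List[List[int]]) -> int:
-- 	n = len(stockPrices)
-- 	if n == 2: return 1
-- 	if n == 1: return 0
--
-- 	day, price = [],[]
-- 	for d, p in stockPrices:
-- 		day.append(d)
-- 		price.append(p)
-- 	stocks = sorted(zip(day,price))
-- 	line = 1
-- 	for i in range(1,n-1):
-- 		p1, p2, p3 = stocks[i-1], stocks[i], stocks[i+1]
-- 		if (p1[1]-p2[1])*(p2[0]-p3[0]) != (p2[1]-p3[1])*(p1[0]-p2[0]):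
-- 			line += 1
-- 	return line
-- ===== SOURCE B (Python) =====
-- def solution_1574_5(stockPrices):
--     n = len(stockPrices)
--     if n == 2: return 1
--     if n == 1: return 0
--     pts = sorted((r[0], r[1]) for r in stockPrices)
--
--     def breaks(s):
--         m = len(s)
--         if m < 3:
--             return 0
--         if m == 3:
--             (x1, y1), (x2, y2), (x3, y3) = s
--             return 0 if (y1 - y2) * (x2 - x3) == (y2 - y3) * (x1 - x2) else 1
--         mid = m // 2
--         return breaks(s[:mid + 1]) + breaks(s[mid - 1:])
--
--     return breaks(pts) + 1
-- ===== Notes on version B (the rewrite author's own statement) =====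
-- stated objective: alternative
-- what changed: Replaces A's linear index loop over consecutive triples by a divide-and-conquer recursion that splits the sorted point list into two halves overlapping in two points and sums their break counts.
import Mathlib
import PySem

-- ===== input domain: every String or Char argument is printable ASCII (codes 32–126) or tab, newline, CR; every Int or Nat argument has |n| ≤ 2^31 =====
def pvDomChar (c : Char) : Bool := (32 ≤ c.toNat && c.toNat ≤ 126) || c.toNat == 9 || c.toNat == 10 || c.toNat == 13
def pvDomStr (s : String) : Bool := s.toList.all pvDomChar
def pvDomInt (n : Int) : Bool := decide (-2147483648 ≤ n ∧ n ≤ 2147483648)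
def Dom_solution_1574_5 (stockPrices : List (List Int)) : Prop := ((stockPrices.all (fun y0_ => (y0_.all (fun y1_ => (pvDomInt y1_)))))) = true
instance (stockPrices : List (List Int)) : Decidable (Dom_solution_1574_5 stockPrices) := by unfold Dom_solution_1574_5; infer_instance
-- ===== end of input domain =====

-- B replaces A's single index loop over consecutive triples by a divide-and-conquer recursion on the
-- sorted point list (split into two halves sharing two boundary points, sum the break counts): an
-- alternative decomposition of the same cost.

-- ===== PORT A =====
-- 'd, p = row' tuple unpacking: row[0] and row[1] (exact on the length-2 rows Pre_ admits)
def pvFst (r : List Int) : Int := (PySem.List.pyGet? r 0).getD 0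
def pvSnd (r : List Int) : Int := (PySem.List.pyGet? r 1).getD 0

def solution_1574_5 (stockPrices : List (List Int)) : Int :=
  let n : Int := stockPrices.length
  if n = 2 then 1
  else if n = 1 then 0
  else
    let dp := stockPrices.foldl (fun acc r => (acc.1 ++ [pvFst r], acc.2 ++ [pvSnd r])) ([], [])
    let stocks := PySem.List.sorted2 (dp.1.zip dp.2) (fun t => t.1) (fun t => t.2)
    (PySem.List.pyRange 1 (n - 1) 1).foldl (fun line i =>
      let p1 := PySem.List.pyGetD stocks (i - 1) ((0 : Int), (0 : Int))
      let p2 := PySem.List.pyGetD stocks i ((0 : Int), (0 : Int))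
      let p3 := PySem.List.pyGetD stocks (i + 1) ((0 : Int), (0 : Int))
      if (p1.2 - p2.2) * (p2.1 - p3.1) ≠ (p2.2 - p3.2) * (p1.1 - p2.1) then line + 1 else line) 1

-- ===== PORT B =====
-- Source B's recursive helper 'breaks': split the list at the midpoint into two halves overlapping
-- in two points and add the counts; a length-3 list is the base collinearity test.
-- (fuel = list length, a totality guard only: each recursive call strictly shortens the list)
def pvBrkF : Nat → List (Int × Int) → Int
  | 0, _ => 0
  | Nat.succ f, s =>
    if s.length < 3 then 0
    else if s.length = 3 then
      match s with
      | [p1, p2, p3] =>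
          if (p1.2 - p2.2) * (p2.1 - p3.1) = (p2.2 - p3.2) * (p1.1 - p2.1) then 0 else 1
      | _ => 0
    else
      pvBrkF f (s.take (s.length / 2 + 1)) + pvBrkF f (s.drop (s.length / 2 - 1))

def pvBrk (s : List (Int × Int)) : Int := pvBrkF s.length s

def solution_1574_5_alt (stockPrices : List (List Int)) : Int :=
  let n : Int := stockPrices.length
  if n = 2 then 1
  else if n = 1 then 0
  else
    let pts := PySem.List.sorted2 (stockPrices.map (fun r => (pvFst r, pvSnd r))) (fun t => t.1) (fun t => t.2)
    pvBrk pts + 1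

-- ===== PRECONDITION & SPEC =====
-- Pre_ excludes exactly the inputs on which A raises: when the loop runs (length ≥ 3, i.e. not the
-- early n==1/n==2 returns), every row must be a [day, price] pair, else 'for d, p in …' raises ValueError.
def Pre_solution_1574_5 (stockPrices : List (List Int)) : Prop :=
  3 ≤ stockPrices.length → ∀ r ∈ stockPrices, r.length = 2
instance (stockPrices : List (List Int)) : Decidable (Pre_solution_1574_5 stockPrices) := by
  unfold Pre_solution_1574_5; infer_instance

def pvWitness_solution_1574_5 : List (List Int) := [[0, 0], [1, 1], [2, 3]]

def Spec_solution_1574_5 (stockPrices : List (List Int)) (out : Int) : Prop := out = solution_1574_5_alt stockPrices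
instance (stockPrices : List (List Int)) (out : Int) : Decidable (Spec_solution_1574_5 stockPrices out) := by unfold Spec_solution_1574_5; infer_instance

-- ===== CLAIM (what is proved, stated in full; the proofs are below) =====
def Claim_equal_solution_1574_5 : Prop := ∀ (stockPrices : List (List Int)), Dom_solution_1574_5 stockPrices → Pre_solution_1574_5 stockPrices → Spec_solution_1574_5 stockPrices (solution_1574_5 stockPrices)

-- ===== LEMMAS AND PROOFS =====

-- A's loop, characterised structurally: number of consecutive triples failing the collinearity test
def pvBreaks : List (Int × Int) → Int
  | a :: b :: c :: t =>
      (if (a.2 - b.2) * (b.1 - c.1) ≠ (b.2 - c.2) * (a.1 - b.1) then 1 else 0) + pvBreaks (b :: c :: t)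
  | _ => 0

theorem pvBreaks_cons (a b c : Int × Int) (t : List (Int × Int)) :
    pvBreaks (a :: b :: c :: t)
      = (if (a.2 - b.2) * (b.1 - c.1) ≠ (b.2 - c.2) * (a.1 - b.1) then 1 else 0)
        + pvBreaks (b :: c :: t) := rfl

theorem pvBreaks_split : ∀ (u : List (Int × Int)) (a b : Int × Int) (v : List (Int × Int)),
    pvBreaks (u ++ a :: b :: v) = pvBreaks (u ++ [a, b]) + pvBreaks (a :: b :: v) := by
  intro u
  induction u with
  | nil => intro a b v; simp [pvBreaks]
  | cons x u ih =>
      intro a b v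
      cases u with
      | nil =>
          have h1 : pvBreaks (x :: a :: b :: v)
              = (if (x.2 - a.2) * (a.1 - b.1) ≠ (a.2 - b.2) * (x.1 - a.1) then 1 else 0)
                + pvBreaks (a :: b :: v) := pvBreaks_cons x a b v
          have h2 : pvBreaks ([x, a, b])
              = (if (x.2 - a.2) * (a.1 - b.1) ≠ (a.2 - b.2) * (x.1 - a.1) then 1 else 0)
                + pvBreaks ([a, b]) := pvBreaks_cons x a b []
          have h3 : pvBreaks ([a, b] : List (Int × Int)) = 0 := rfl
          simp only [List.cons_append, List.nil_append]
          rw [h1, h2, h3]; ring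
      | cons y u' =>
          cases u' with
          | nil =>
              have h1 : pvBreaks (x :: y :: ([] : List (Int × Int)) ++ a :: b :: v)
                  = (if (x.2 - y.2) * (y.1 - a.1) ≠ (y.2 - a.2) * (x.1 - y.1) then 1 else 0)
                    + pvBreaks (y :: a :: b :: v) := rfl
              have h2 : pvBreaks (x :: y :: ([] : List (Int × Int)) ++ [a, b])
                  = (if (x.2 - y.2) * (y.1 - a.1) ≠ (y.2 - a.2) * (x.1 - y.1) then 1 else 0)
                    + pvBreaks (y :: a :: b :: ([] : List (Int × Int))) := rfl
              have h3 := ih a b v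
              simp only [List.cons_append, List.nil_append] at h1 h2 h3 ⊢
              rw [h1, h2, h3]; ring
          | cons z u'' =>
              have h1 : pvBreaks (x :: y :: z :: (u'' ++ a :: b :: v))
                  = (if (x.2 - y.2) * (y.1 - z.1) ≠ (y.2 - z.2) * (x.1 - y.1) then 1 else 0)
                    + pvBreaks (y :: z :: (u'' ++ a :: b :: v)) := rfl
              have h2 : pvBreaks (x :: y :: z :: (u'' ++ [a, b]))
                  = (if (x.2 - y.2) * (y.1 - z.1) ≠ (y.2 - z.2) * (x.1 - y.1) then 1 else 0)
                    + pvBreaks (y :: z :: (u'' ++ [a, b])) := rfl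
              have h3 := ih a b v
              simp only [List.cons_append] at h1 h2 h3 ⊢
              rw [h1, h2, h3]; ring

theorem pvBreaks_small (s : List (Int × Int)) (h : s.length < 3) : pvBreaks s = 0 := by
  match s, h with
  | [], _ => rfl
  | [_], _ => rfl
  | [_, _], _ => rfl

theorem pvBrkF_eq_pvBreaks : ∀ (f : Nat) (s : List (Int × Int)), s.length ≤ f → pvBrkF f s = pvBreaks s := by
  intro f
  induction f with
  | zero =>
      intro s hs
      have h0 : s = [] := List.length_eq_zero_iff.mp (by omega)
      subst h0; rfl
  | succ n ih =>
      intro s hs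
      simp only [pvBrkF]
      by_cases hlt : s.length < 3
      · rw [if_pos hlt, pvBreaks_small s hlt]
      rw [if_neg hlt]
      by_cases h3 : s.length = 3
      · rw [if_pos h3]
        rcases s with _ | ⟨a, _ | ⟨b, _ | ⟨c, t⟩⟩⟩ <;> simp at h3
        subst h3
        by_cases h : (a.2 - b.2) * (b.1 - c.1) = (b.2 - c.2) * (a.1 - b.1)
        · simp [pvBreaks, h]
        · simp [pvBreaks, h]
      · rw [if_neg h3]
        have hlen4 : 4 ≤ s.length := by omega
        set m := s.length with hm
        have hmid1 : 2 ≤ m / 2 := by omega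
        have hmid2 : m / 2 + 2 ≤ m := by omega
        have hdl : (s.drop (m / 2 - 1)).length = m - (m / 2 - 1) := by
          rw [List.length_drop]
        obtain ⟨a, b, v, hd⟩ : ∃ a b v, s.drop (m / 2 - 1) = a :: b :: v := by
          rcases hds : s.drop (m / 2 - 1) with _ | ⟨a, _ | ⟨b, v⟩⟩
          · rw [hds] at hdl; simp at hdl; omega
          · rw [hds] at hdl; simp at hdl; omega
          · exact ⟨a, b, v, rfl⟩
        have htk : s.take (m / 2 + 1) = s.take (m / 2 - 1) ++ [a, b] := by
          have he : m / 2 + 1 = (m / 2 - 1) + 2 := by omega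
          rw [he, List.take_add, hd]
          rfl
        have hsplit : s = s.take (m / 2 - 1) ++ a :: b :: v := by
          conv_lhs => rw [← List.take_append_drop (m / 2 - 1) s]
          rw [hd]
        have hlt1 : (s.take (m / 2 + 1)).length ≤ n := by
          simp only [List.length_take]; omega
        have hlt2 : (s.drop (m / 2 - 1)).length ≤ n := by
          simp only [List.length_drop]; omega
        rw [ih _ hlt1, ih _ hlt2, hd, htk]
        calc pvBreaks (s.take (m / 2 - 1) ++ [a, b]) + pvBreaks (a :: b :: v)
            = pvBreaks (s.take (m / 2 - 1) ++ a :: b :: v) :=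
              (pvBreaks_split (s.take (m / 2 - 1)) a b v).symm
          _ = pvBreaks s := by rw [← hsplit]

-- ===== A's loop evaluated to pvBreaks (same chain as a direct sum over the range) =====
theorem pvFoldIteAdd (l : List Nat) (C : Nat → Prop) [DecidablePred C] (init : Int) :
    l.foldl (fun line k => if C k then line + 1 else line) init
      = init + (l.map fun k => if C k then (1 : Int) else 0).sum := by
  induction l generalizing init with
  | nil => simp
  | cons k l ih =>
      rw [List.foldl_cons, ih]
      by_cases h : C k
      · simp [h]
        ring
      · simp [h]

theorem pvSumBreaks (s : List (Int × Int)) :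
    ((List.range (s.length - 2)).map (fun k =>
      if ((s.getD k (0, 0)).2 - (s.getD (k + 1) (0, 0)).2) * ((s.getD (k + 1) (0, 0)).1 - (s.getD (k + 2) (0, 0)).1)
          ≠ ((s.getD (k + 1) (0, 0)).2 - (s.getD (k + 2) (0, 0)).2) * ((s.getD k (0, 0)).1 - (s.getD (k + 1) (0, 0)).1)
        then (1 : Int) else 0)).sum = pvBreaks s := by
  induction s with
  | nil => simp [pvBreaks]
  | cons a s ih =>
      cases s with
      | nil => simp [pvBreaks]
      | cons b s2 =>
          cases s2 with
          | nil => simp [pvBreaks]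
          | cons c t =>
              have hlen : (a :: b :: c :: t).length - 2 = t.length + 1 := by simp
              have hlen' : (b :: c :: t).length - 2 = t.length := by simp
              rw [hlen, List.range_succ_eq_map, List.map_cons, List.sum_cons, List.map_map]
              have hshift : List.map
                  ((fun k =>
                    if ((( a :: b :: c :: t).getD k (0, 0)).2 - (((a :: b :: c :: t)).getD (k + 1) (0, 0)).2) * ((((a :: b :: c :: t)).getD (k + 1) (0, 0)).1 - (((a :: b :: c :: t)).getD (k + 2) (0, 0)).1)
                        ≠ ((((a :: b :: c :: t)).getD (k + 1) (0, 0)).2 - (((a :: b :: c :: t)).getD (k + 2) (0, 0)).2) * ((((a :: b :: c :: t)).getD k (0, 0)).1 - (((a :: b :: c :: t)).getD (k + 1) (0, 0)).1)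
                      then (1 : Int) else 0) ∘ Nat.succ) (List.range t.length)
                  = List.map (fun k =>
                    if (((b :: c :: t).getD k (0, 0)).2 - ((b :: c :: t).getD (k + 1) (0, 0)).2) * (((b :: c :: t).getD (k + 1) (0, 0)).1 - ((b :: c :: t).getD (k + 2) (0, 0)).1)
                        ≠ (((b :: c :: t).getD (k + 1) (0, 0)).2 - ((b :: c :: t).getD (k + 2) (0, 0)).2) * (((b :: c :: t).getD k (0, 0)).1 - ((b :: c :: t).getD (k + 1) (0, 0)).1)
                      then (1 : Int) else 0) (List.range t.length) := by
                apply List.map_congr_left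
                intro k _
                simp [Function.comp]
              rw [hshift, ← hlen', ih]
              rw [pvBreaks_cons]
              simp

theorem pvFoldA (s : List (Int × Int)) :
    (PySem.List.pyRange 1 ((s.length : Int) - 1) 1).foldl (fun line i =>
      let p1 := PySem.List.pyGetD s (i - 1) ((0 : Int), (0 : Int))
      let p2 := PySem.List.pyGetD s i ((0 : Int), (0 : Int))
      let p3 := PySem.List.pyGetD s (i + 1) ((0 : Int), (0 : Int))
      if (p1.2 - p2.2) * (p2.1 - p3.1) ≠ (p2.2 - p3.2) * (p1.1 - p2.1) then line + 1 else line) 1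
    = 1 + pvBreaks s := by
  have hM : (((s.length : Int) - 1) - 1).toNat = s.length - 2 := by omega
  rw [PySem.List.pyRange_one, List.foldl_map]
  refine Eq.trans (pvFoldIteAdd (List.range (((s.length : Int) - 1) - 1).toNat)
    (fun k =>
      ((PySem.List.pyGetD s (1 + (k : Int) - 1) ((0 : Int), (0 : Int))).2 - (PySem.List.pyGetD s (1 + (k : Int)) ((0 : Int), (0 : Int))).2)
        * ((PySem.List.pyGetD s (1 + (k : Int)) ((0 : Int), (0 : Int))).1 - (PySem.List.pyGetD s (1 + (k : Int) + 1) ((0 : Int), (0 : Int))).1)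
      ≠ ((PySem.List.pyGetD s (1 + (k : Int)) ((0 : Int), (0 : Int))).2 - (PySem.List.pyGetD s (1 + (k : Int) + 1) ((0 : Int), (0 : Int))).2)
        * ((PySem.List.pyGetD s (1 + (k : Int) - 1) ((0 : Int), (0 : Int))).1 - (PySem.List.pyGetD s (1 + (k : Int)) ((0 : Int), (0 : Int))).1)) 1) ?_
  congr 1
  have hpt : ∀ k ∈ List.range (((s.length : Int) - 1) - 1).toNat,
      (if ((PySem.List.pyGetD s (1 + (k : Int) - 1) ((0 : Int), (0 : Int))).2 - (PySem.List.pyGetD s (1 + (k : Int)) ((0 : Int), (0 : Int))).2)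
            * ((PySem.List.pyGetD s (1 + (k : Int)) ((0 : Int), (0 : Int))).1 - (PySem.List.pyGetD s (1 + (k : Int) + 1) ((0 : Int), (0 : Int))).1)
          ≠ ((PySem.List.pyGetD s (1 + (k : Int)) ((0 : Int), (0 : Int))).2 - (PySem.List.pyGetD s (1 + (k : Int) + 1) ((0 : Int), (0 : Int))).2)
            * ((PySem.List.pyGetD s (1 + (k : Int) - 1) ((0 : Int), (0 : Int))).1 - (PySem.List.pyGetD s (1 + (k : Int)) ((0 : Int), (0 : Int))).1)
        then (1 : Int) else 0)
      = (if ((s.getD k (0, 0)).2 - (s.getD (k + 1) (0, 0)).2) * ((s.getD (k + 1) (0, 0)).1 - (s.getD (k + 2) (0, 0)).1)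
          ≠ ((s.getD (k + 1) (0, 0)).2 - (s.getD (k + 2) (0, 0)).2) * ((s.getD k (0, 0)).1 - (s.getD (k + 1) (0, 0)).1)
        then (1 : Int) else 0) := by
    intro k _
    have e0 : (1 + (k : Int) - 1) = ((k : Nat) : Int) := by ring
    have e1 : (1 + (k : Int)) = (((k + 1 : Nat)) : Int) := by push_cast; ring
    have e2 : (1 + (k : Int) + 1) = (((k + 2 : Nat)) : Int) := by push_cast; ring
    rw [e2, e0, e1]
    simp only [PySem.List.pyGetD_natCast]
  rw [List.map_congr_left hpt, hM]
  exact pvSumBreaks s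

-- ===== VERDICT (by name: the statement is the Claim_ definition above) =====
theorem solution_1574_5_spec : Claim_equal_solution_1574_5 := by
  intro sp _ _
  unfold Spec_solution_1574_5
  simp only [solution_1574_5, solution_1574_5_alt]
  by_cases h2 : (sp.length : Int) = 2
  · rw [if_pos h2, if_pos h2]
  rw [if_neg h2, if_neg h2]
  by_cases h1 : (sp.length : Int) = 1
  · rw [if_pos h1, if_pos h1]
  rw [if_neg h1, if_neg h1]
  have hdp : sp.foldl (fun acc r => (acc.1 ++ [pvFst r], acc.2 ++ [pvSnd r]))
        (([] : List Int), ([] : List Int)) = (sp.map pvFst, sp.map pvSnd) := by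
    rw [PySem.List.foldl_prod_mk (fun a r => a ++ [pvFst r]) (fun a r => a ++ [pvSnd r]) sp [] [],
        PySem.List.foldl_append_singleton_eq_map, PySem.List.foldl_append_singleton_eq_map]
    simp
  have hzipdp : ((sp.foldl (fun acc r => (acc.1 ++ [pvFst r], acc.2 ++ [pvSnd r]))
          (([] : List Int), ([] : List Int))).1).zip
        ((sp.foldl (fun acc r => (acc.1 ++ [pvFst r], acc.2 ++ [pvSnd r]))
          (([] : List Int), ([] : List Int))).2)
      = sp.map (fun r => (pvFst r, pvSnd r)) := by
    rw [hdp]; exact List.zip_map'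
  rw [hzipdp]
  set s := PySem.List.sorted2 (sp.map (fun r => (pvFst r, pvSnd r))) (fun t => t.1) (fun t => t.2) with hs
  have hslen : s.length = sp.length := by
    rw [hs, (PySem.List.sorted2_perm (sp.map (fun r => (pvFst r, pvSnd r)))
      (fun t => t.1) (fun t => t.2) false).length_eq, List.length_map]
  rw [← hslen, pvFoldA s]
  unfold pvBrk
  rw [pvBrkF_eq_pvBreaks s.length s (le_refl _)]
  ring
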